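-- pv_equiv track=rewrite | github.com/Nostoi/rom24-quickmud-python | mud/commands/help.py | _normalize_topic
-- ===== SOURCE A (Python) =====
-- def _normalize_topic(raw: str) -> str:
--     """Mirror ROM ``one_argument`` handling for quoted phrases."""
--
--     tokens: list[str] = []
--     length = len(raw)
--     index = 0
--     while index < length:
--         while index < length and raw[index].isspace():
--             index += 1
--         if index >= length:
--             break
--         char = raw[index]
--         if char in {'"', "'", '%'}:
--             terminator = char
--             index += 1
--         elif char == "(":
--             terminator = ")"
--             index += 1
--         else:
--             terminator = None
--         token_chars: list[str] = []
--         while index < length: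
--             current = raw[index]
--             if terminator:
--                 if current == terminator:
--                     index += 1
--                     break
--             else:
--                 if current.isspace():
--                     break
--             token_chars.append(current)
--             index += 1
--         if token_chars:
--             tokens.append("".join(token_chars))
--         while index < length and raw[index].isspace():
--             index += 1
--     return " ".join(tokens)
-- ===== SOURCE B (Python) =====
-- def _normalize_topic(raw: str) -> str:
--     """Mirror ROM ``one_argument`` handling for quoted phrases."""
--
--     tokens: list[str] = []
--     rest = raw.lstrip()
--     while rest:
--         char = rest[0]
--         if char in "\"'%(":
--             terminator = ")" if char == "(" else char
--             token, _, rest = rest[1:].partition(terminator)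
--         else:
--             parts = rest.split(None, 1)
--             token = parts[0]
--             rest = parts[1] if len(parts) > 1 else ""
--         if token:
--             tokens.append(token)
--         rest = rest.lstrip()
--     return " ".join(tokens)
-- ===== Notes on version B (the rewrite author's own statement) =====
-- stated objective: idiomatic
-- what changed: Replaced A's index-driven character-by-character scanner (nested while loops over a position counter, accumulating token characters one at a time) with string-level operations on the remaining suffix: lstrip to skip whitespace, partition to cut a delimited token, split(None, 1) to cut a plain word; same O(n) but the per-character work moves from Python bytecode into C-level string methods.
import Mathlib
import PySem

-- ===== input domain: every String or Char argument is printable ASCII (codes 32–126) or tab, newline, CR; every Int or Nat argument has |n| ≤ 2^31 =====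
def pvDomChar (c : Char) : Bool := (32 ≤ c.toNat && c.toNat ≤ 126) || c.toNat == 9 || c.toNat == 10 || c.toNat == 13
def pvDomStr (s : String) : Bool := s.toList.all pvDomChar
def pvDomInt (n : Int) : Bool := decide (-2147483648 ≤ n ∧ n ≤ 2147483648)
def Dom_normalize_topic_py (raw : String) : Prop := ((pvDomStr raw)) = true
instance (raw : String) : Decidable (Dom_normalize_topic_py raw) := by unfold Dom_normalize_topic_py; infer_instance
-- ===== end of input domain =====

-- B replaces A's index-driven character-by-character scanner by string-level operations
-- (lstrip / partition / split(None, 1)) on the remaining suffix; objective: idiomatic.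

-- ===== PORT A =====
-- 'while index < length and raw[index].isspace(): index += 1' over the remaining suffix
def aSkip : List Char → List Char
  | [] => []
  | c :: rest => if PySem.Chars.isspace c then aSkip rest else c :: rest

-- the inner 'while index < length: …' token loop; returns (token_chars, remaining suffix)
def aTok : Option Char → List Char → List Char × List Char
  | _, [] => ([], [])
  | some t, c :: rest =>
      if c = t then ([], rest)
      else
        let p := aTok (some t) rest
        (c :: p.1, p.2)
  | none, c :: rest =>
      if PySem.Chars.isspace c then ([], c :: rest)
      else
        let p := aTok none rest
        (c :: p.1, p.2)

-- the outer 'while index < length' loop; fuel bounds the iterations (each consumes ≥ 1 char)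
def aLoop : Nat → List Char → List (List Char)
  | 0, _ => []
  | fuel + 1, cs =>
      match aSkip cs with
      | [] => []
      | c :: rest =>
          let d :=
            if c = '"' ∨ c = '\'' ∨ c = '%' then (some c, rest)
            else if c = '(' then (some ')', rest)
            else (none, c :: rest)
          let p := aTok d.1 d.2
          (if p.1 = [] then [] else [p.1]) ++ aLoop fuel (aSkip p.2)

def normalize_topic_py (raw : String) : String :=
  String.ofList (PySem.Chars.join [' '] (aLoop (raw.toList.length + 1) raw.toList))

-- ===== PORT B =====
-- hand port of str.partition for a one-character separator (exact there):
-- (part before the first t, the separator if found, part after it; last two empty when t is absent)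
def bPartition (t : Char) (cs : List Char) : List Char × List Char × List Char :=
  (cs.takeWhile (· ≠ t), (cs.dropWhile (· ≠ t)).take 1, (cs.dropWhile (· ≠ t)).tail)

-- the 'while rest:' loop of B; fuel bounds the iterations
def bLoop : Nat → List Char → List (List Char)
  | 0, _ => []
  | fuel + 1, cs =>
      match cs with
      | [] => []
      | c :: rest =>
          let p :=
            if c = '"' ∨ c = '\'' ∨ c = '%' ∨ c = '(' then
              let t := if c = '(' then ')' else c
              let q := bPartition t rest
              (q.1, q.2.2)
            else
              match PySem.Chars.split₀Max (c :: rest) 1 with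
              | [] => ([], [])             -- unreachable: (c :: rest).split(None, 1) is never empty
              | [tok] => (tok, [])
              | tok :: r :: _ => (tok, r)
          (if p.1 = [] then [] else [p.1]) ++ bLoop fuel (PySem.Chars.lstrip p.2)

def normalize_topic_py_alt (raw : String) : String :=
  String.ofList (PySem.Chars.join [' ']
    (bLoop (raw.toList.length + 1) (PySem.Chars.lstrip raw.toList)))

-- ===== PRECONDITION & SPEC =====
def Spec_normalize_topic_py (raw : String) (out : String) : Prop := out = normalize_topic_py_alt raw
instance (raw : String) (out : String) : Decidable (Spec_normalize_topic_py raw out) := by unfold Spec_normalize_topic_py; infer_instance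

-- ===== CLAIM (what is proved, stated in full; the proofs are below) =====
def Claim_equal_normalize_topic_py : Prop := ∀ (raw : String), Dom_normalize_topic_py raw → Spec_normalize_topic_py raw (normalize_topic_py raw)

-- ===== LEMMAS AND PROOFS =====

theorem aSkip_eq_lstrip (cs : List Char) : aSkip cs = PySem.Chars.lstrip cs := by
  induction cs with
  | nil => rfl
  | cons c rest ih =>
      simp only [aSkip, PySem.Chars.lstrip, List.dropWhile]
      by_cases h : PySem.Chars.isspace c = true
      · simp [h, ih, PySem.Chars.lstrip]
      · simp [h]
theorem aSkip_length_le (cs : List Char) : (aSkip cs).length ≤ cs.length := by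
  induction cs with
  | nil => simp [aSkip]
  | cons c rest ih =>
      simp only [aSkip]
      by_cases h : PySem.Chars.isspace c = true
      · simp [h]; omega
      · simp [h]
theorem aSkip_head_not_space (cs : List Char) (c : Char) (rest : List Char) (h : aSkip cs = c :: rest) :
    PySem.Chars.isspace c = false := by
  induction cs with
  | nil => simp [aSkip] at h
  | cons x xs ih =>
      simp only [aSkip] at h
      by_cases hx : PySem.Chars.isspace x = true
      · simp [hx] at h; exact ih h
      · simp [hx] at h
        simp [← h.1]
        simpa using hx
theorem aTok_some (t : Char) (cs : List Char) :
    aTok (some t) cs = (cs.takeWhile (· ≠ t), (cs.dropWhile (· ≠ t)).tail) := by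
  induction cs with
  | nil => rfl
  | cons c rest ih =>
      simp only [aTok, List.takeWhile, List.dropWhile]
      by_cases h : c = t
      · simp [h]
      · simp [h, ih]
theorem aTok_none (cs : List Char) :
    aTok none cs = (cs.takeWhile (fun c => !PySem.Chars.isspace c),
                    cs.dropWhile (fun c => !PySem.Chars.isspace c)) := by
  induction cs with
  | nil => rfl
  | cons c rest ih =>
      simp only [aTok, List.takeWhile, List.dropWhile]
      by_cases h : PySem.Chars.isspace c = true
      · simp [h]
      · simp [h, ih]
theorem lstrip_idem (cs : List Char) : PySem.Chars.lstrip (PySem.Chars.lstrip cs) = PySem.Chars.lstrip cs := by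
  induction cs with
  | nil => rfl
  | cons c rest ih =>
      simp only [PySem.Chars.lstrip, List.dropWhile]
      by_cases h : PySem.Chars.isspace c = true
      · simpa [h, PySem.Chars.lstrip] using ih
      · simp [h]
theorem split₀Max_one (c : Char) (rest : List Char) (hc : PySem.Chars.isspace c = false) :
    PySem.Chars.split₀Max (c :: rest) 1 =
      (let tok := (c :: rest).takeWhile (fun x => !PySem.Chars.isspace x)
       let r := PySem.Chars.lstrip ((c :: rest).dropWhile (fun x => !PySem.Chars.isspace x))
       if r = [] then [tok] else [tok, r]) := by
  have h1 : List.dropWhile PySem.Chars.isspace (c :: rest) = c :: rest := by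
    simp [List.dropWhile, hc]
  unfold PySem.Chars.split₀Max
  norm_num
  rw [PySem.Chars.split₀Max.go.eq_def]
  simp only [h1]
  norm_num
  rw [PySem.Chars.split₀Max.go.eq_def]
  cases h2 : List.dropWhile PySem.Chars.isspace
      (List.dropWhile (fun c => !PySem.Chars.isspace c) (c :: rest)) with
  | nil => simp [h2, PySem.Chars.lstrip]
  | cons a as => simp [h2, PySem.Chars.lstrip]

theorem loop_eq (fuel : Nat) : ∀ cs : List Char, cs.length < fuel →
    aLoop fuel cs = bLoop fuel (aSkip cs) := by
  induction fuel with
  | zero => intro cs h; omega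
  | succ fuel ih =>
    intro cs hlen
    rw [aLoop]
    cases hsk : aSkip cs with
    | nil => rw [bLoop]
    | cons c rest =>
      rw [bLoop]
      have hc : PySem.Chars.isspace c = false := aSkip_head_not_space cs c rest hsk
      have hrest : rest.length < fuel := by
        have h := aSkip_length_le cs
        rw [hsk] at h
        simp only [List.length_cons] at h
        omega
      have hrec : ∀ r2 : List Char, r2.length < fuel →
          aLoop fuel (aSkip r2) = bLoop fuel (PySem.Chars.lstrip r2) := by
        intro r2 h2
        have := ih (aSkip r2) (lt_of_le_of_lt (aSkip_length_le r2) h2)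
        rw [this, aSkip_eq_lstrip, aSkip_eq_lstrip, lstrip_idem]
      have htail : ∀ t : Char, ((rest.dropWhile (· ≠ t)).tail).length < fuel := by
        intro t
        have h1 : ((rest.dropWhile (· ≠ t)).tail).length ≤ (rest.dropWhile (· ≠ t)).length := by
          cases rest.dropWhile (· ≠ t) <;> simp
        exact lt_of_le_of_lt (le_trans h1 (List.dropWhile_sublist _).length_le) hrest
      by_cases h1 : c = '"' ∨ c = '\'' ∨ c = '%'
      · have hnp : c ≠ '(' := by rcases h1 with h|h|h <;> simp [h]
        have hOr : c = '"' ∨ c = '\'' ∨ c = '%' ∨ c = '(' := by tauto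
        simp only [if_pos h1, if_pos hOr, if_neg hnp, aTok_some, bPartition]
        rw [hrec _ (htail c)]
      · by_cases h2 : c = '('
        · have hOr : c = '"' ∨ c = '\'' ∨ c = '%' ∨ c = '(' := by tauto
          simp only [if_neg h1, if_pos h2, if_pos hOr, aTok_some, bPartition]
          rw [hrec _ (htail ')')]
        · have hOr : ¬ (c = '"' ∨ c = '\'' ∨ c = '%' ∨ c = '(') := by tauto
          simp only [if_neg h1, if_neg h2, if_neg hOr, aTok_none]
          rw [split₀Max_one c rest hc]
          have hd : List.dropWhile (fun x => !PySem.Chars.isspace x) (c :: rest)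
              = List.dropWhile (fun x => !PySem.Chars.isspace x) rest := by
            simp [List.dropWhile, hc]
          have hlen2 : (List.dropWhile (fun x => !PySem.Chars.isspace x) (c :: rest)).length < fuel := by
            rw [hd]
            exact lt_of_le_of_lt (List.dropWhile_sublist _).length_le hrest
          cases hr : PySem.Chars.lstrip (List.dropWhile (fun x => !PySem.Chars.isspace x) (c :: rest)) with
          | nil =>
            rw [hrec _ hlen2, hr]
            simp [PySem.Chars.lstrip]
          | cons a as =>
            simp only [if_neg (by simp : ¬ (a :: as = ([] : List Char)))]
            rw [hrec _ hlen2, hr]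
            have hfix : PySem.Chars.lstrip (a :: as) = a :: as := by
              rw [← hr, lstrip_idem, hr]
            rw [hfix]

-- ===== VERDICT (by name: the statement is the Claim_ definition above) =====
theorem normalize_topic_py_spec : Claim_equal_normalize_topic_py := by
  intro raw _
  unfold Spec_normalize_topic_py normalize_topic_py normalize_topic_py_alt
  rw [← aSkip_eq_lstrip, loop_eq _ _ (Nat.lt_succ_self _)]
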